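-- pv_equiv track=rewrite | github.com/anilprakash94/isanreg | isanreg_dataprocess.py | exclude_regions
-- ===== SOURCE A (Python) =====
-- def exclude_regions(pos_bins, bed_dict):
--     input_list = []
--     for x in pos_bins:
--         chr_name = x[0]
--         if chr_name in bed_dict:
--             for y in bed_dict[chr_name]:
--                 if (int(x[1]) < int(y[1]) and int(x[2]) > int(y[0])):
--                     break
--                 else:
--                     pass
--             else:
--                 input_list.append(x)
--         else:
--             input_list.append(x)
--     return input_list
-- ===== SOURCE B (Python) =====
-- def exclude_regions(pos_bins, bed_dict):
--     needed = set()
--     for x in pos_bins: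
--         needed.add(x[0])
--     index = {}
--     for chrom, ivs in bed_dict.items():
--         if chrom in needed:
--             pairs = sorted(((int(y[0]), int(y[1])) for y in ivs), key=lambda p: p[0])
--             starts = [p[0] for p in pairs]
--             prefmax = []
--             m = None
--             for p in pairs:
--                 if m is None or p[1] > m:
--                     m = p[1]
--                 prefmax.append(m)
--             index[chrom] = (starts, prefmax)
--     out = []
--     for x in pos_bins:
--         entry = index.get(x[0])
--         if entry is None or not entry[0]:
--             out.append(x)
--         else:
--             starts, prefmax = entry
--             xs = int(x[1])
--             xe = int(x[2])
--             lo = 0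
--             hi = len(starts)
--             while lo < hi:
--                 mid = (lo + hi) // 2
--                 if starts[mid] < xe:
--                     lo = mid + 1
--                 else:
--                     hi = mid
--             if lo == 0 or prefmax[lo - 1] <= xs:
--                 out.append(x)
--     return out
-- ===== Notes on version B (the rewrite author's own statement) =====
-- stated objective: faster
-- what changed: B replaces A's per-bin linear scan of all bed intervals (with repeated int() reparsing) by a per-chromosome index built once for the chromosomes that occur in pos_bins - intervals parsed once, sorted by start, with a running prefix-maximum of ends - so each bin is answered by one binary search over starts plus one prefix-max comparison.
-- outside the precondition, e.g. on exclude_regions([['c', '0', '5']], {'c': [['1', '9'], ['x']]}): A returns [], B raises ValueError; on exclude_regions([['c', '9']], {'c': [['1', '5']]}): A returns [['c', '9']], B raises IndexError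
import Mathlib
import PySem

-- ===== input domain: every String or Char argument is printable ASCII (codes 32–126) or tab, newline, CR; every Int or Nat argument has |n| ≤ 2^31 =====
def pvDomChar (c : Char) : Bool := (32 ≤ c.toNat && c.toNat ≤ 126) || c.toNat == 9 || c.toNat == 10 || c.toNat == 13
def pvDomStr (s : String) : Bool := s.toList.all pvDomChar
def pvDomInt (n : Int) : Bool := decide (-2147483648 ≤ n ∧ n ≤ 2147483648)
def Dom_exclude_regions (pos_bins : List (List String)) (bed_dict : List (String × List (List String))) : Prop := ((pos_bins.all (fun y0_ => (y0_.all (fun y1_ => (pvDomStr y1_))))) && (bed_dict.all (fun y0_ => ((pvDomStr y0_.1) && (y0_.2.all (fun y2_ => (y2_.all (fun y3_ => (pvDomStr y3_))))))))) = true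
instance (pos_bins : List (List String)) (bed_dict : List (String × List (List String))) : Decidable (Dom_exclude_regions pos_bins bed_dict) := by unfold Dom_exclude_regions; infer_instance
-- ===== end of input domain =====

-- B builds a per-chromosome index (intervals parsed once, sorted by start, prefix-maximum of ends)
-- for the chromosomes occurring in pos_bins and answers each bin by one binary search; A rescans
-- (and reparses) every interval for every bin.

-- x[i] and int(x[i]) totalised with defaults; Pre_ keeps the inputs where no default fires mid-run.
def pvStr (x : List String) (i : Nat) : String := (PySem.List.pyGet? x (i : Int)).getD ""
def pvI (x : List String) (i : Nat) : Int := (PySem.Int.ofStr? (pvStr x i)).getD 0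

-- ===== PORT A =====
-- the inner 'for y in bed_dict[chr_name]: … break / else: append' loop: true = no break (append)
def scanA (x : List String) : List (List String) → Bool
  | [] => true
  | y :: t => if pvI x 1 < pvI y 1 ∧ pvI x 2 > pvI y 0 then false else scanA x t

def exclude_regions (pos_bins : List (List String)) (bed_dict : List (String × List (List String))) : List (List String) :=
  pos_bins.foldl (fun acc x =>
    match (PySem.Dict.mk bed_dict).get? (pvStr x 0) with
    | some ivs => if scanA x ivs then acc ++ [x] else acc
    | none => acc ++ [x]) []

-- ===== PORT B =====
-- pairs = sorted(((int(y[0]), int(y[1])) for y in ivs), key=lambda p: p[0])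
def pairsOf (ivs : List (List String)) : List (Int × Int) :=
  PySem.List.sorted (ivs.map (fun y => (pvI y 0, pvI y 1))) Prod.fst false

-- the 'm = None; for p in pairs: … prefmax.append(m)' running-maximum loop
def prefmaxGo : List (Int × Int) → Option Int → List Int
  | [], _ => []
  | p :: t, m =>
    let m' : Int := match m with
      | none => p.2
      | some v => if p.2 > v then p.2 else v
    m' :: prefmaxGo t (some m')

def entryOf (ivs : List (List String)) : List Int × List Int :=
  ((pairsOf ivs).map Prod.fst, prefmaxGo (pairsOf ivs) none)

-- the 'while lo < hi' binary-search loop (fuel = hi - lo at the call site bounds the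
-- iteration count; it only makes the recursion structural and never runs out)
def bsr (starts : List Int) (xe : Int) : Nat → Nat → Nat → Nat
  | 0, lo, _hi => lo
  | fuel + 1, lo, hi =>
    if lo < hi then
      let mid := (lo + hi) / 2
      if starts.getD mid 0 < xe then bsr starts xe fuel (mid + 1) hi
      else bsr starts xe fuel lo mid
    else lo

-- the 'for chrom, ivs in bed_dict.items(): if chrom in needed: index[chrom] = …' loop
def buildIndex (needed : PySem.Set String) (bed_dict : List (String × List (List String))) : PySem.Dict String (List Int × List Int) :=
  bed_dict.foldl (fun d kv => if kv.1 ∈ needed then d.insert kv.1 (entryOf kv.2) else d) PySem.Dict.empty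

def exclude_regions_alt (pos_bins : List (List String)) (bed_dict : List (String × List (List String))) : List (List String) :=
  let needed := pos_bins.foldl (fun s x => PySem.Set.add s (pvStr x 0)) (PySem.Set.ofList [])
  let index := buildIndex needed bed_dict
  pos_bins.foldl (fun out x =>
    match index.get? (pvStr x 0) with
    | none => out ++ [x]
    | some e =>
      if e.1 = [] then out ++ [x]
      else
        let xs := pvI x 1
        let xe := pvI x 2
        let lo := bsr e.1 xe e.1.length 0 e.1.length
        if lo = 0 ∨ e.2.getD (lo - 1) 0 ≤ xs then out ++ [x] else out) []

-- ===== PRECONDITION & SPEC =====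
-- Pre_ excludes (a) association lists with duplicate chromosome keys (impossible for a real Python
-- dict, whose collapsing the assoc-list model cannot reproduce), and (b) inputs with missing or
-- non-int fields that A happens to survive only because short-circuit evaluation, an early break or
-- an unreferenced chromosome skips the parse, while B parses referenced chromosomes up front.
def Pre_exclude_regions (pos_bins : List (List String)) (bed_dict : List (String × List (List String))) : Prop :=
  (bed_dict.map Prod.fst).Nodup ∧
  (∀ x ∈ pos_bins, x ≠ []) ∧
  (∀ kv ∈ bed_dict, (∃ x ∈ pos_bins, pvStr x 0 = kv.1) →
      ∀ y ∈ kv.2, (PySem.Int.ofStr? (pvStr y 0)).isSome ∧ (PySem.Int.ofStr? (pvStr y 1)).isSome) ∧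
  (∀ x ∈ pos_bins, ∀ kv ∈ bed_dict, kv.1 = pvStr x 0 → kv.2 ≠ [] →
      (PySem.Int.ofStr? (pvStr x 1)).isSome ∧ (PySem.Int.ofStr? (pvStr x 2)).isSome)
instance (pos_bins : List (List String)) (bed_dict : List (String × List (List String))) : Decidable (Pre_exclude_regions pos_bins bed_dict) := by unfold Pre_exclude_regions; infer_instance

def pvWitness_exclude_regions : List (List String) × (List (String × List (List String))) :=
  ([["chr1", "5", "10"], ["chr2", "1", "2"]], [("chr1", [["20", "30"], ["8", "9"]])])

def Spec_exclude_regions (pos_bins : List (List String)) (bed_dict : List (String × List (List String))) (out : List (List String)) : Prop := out = exclude_regions_alt pos_bins bed_dict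
instance (pos_bins : List (List String)) (bed_dict : List (String × List (List String))) (out : List (List String)) : Decidable (Spec_exclude_regions pos_bins bed_dict out) := by unfold Spec_exclude_regions; infer_instance

-- ===== CLAIM (what is proved, stated in full; the proofs are below) =====
def Claim_equal_exclude_regions : Prop := ∀ (pos_bins : List (List String)) (bed_dict : List (String × List (List String))), Dom_exclude_regions pos_bins bed_dict → Pre_exclude_regions pos_bins bed_dict → Spec_exclude_regions pos_bins bed_dict (exclude_regions pos_bins bed_dict)

-- ===== LEMMAS AND PROOFS =====

-- A's inner loop returns true iff no (parsed) interval overlaps the bin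
theorem scanA_eq_true_iff (x : List String) (ivs : List (List String)) :
    scanA x ivs = true ↔ ∀ p ∈ ivs.map (fun y => (pvI y 0, pvI y 1)), ¬(pvI x 1 < p.2 ∧ pvI x 2 > p.1) := by
  induction ivs with
  | nil => simp [scanA]
  | cons y t ih =>
    simp only [scanA, List.map_cons, List.mem_cons]
    split_ifs with h
    · simp only [false_iff, not_forall]
      push Not
      exact ⟨(pvI y 0, pvI y 1), Or.inl rfl, by simpa using h⟩
    · constructor
      · intro hs p hp
        rcases hp with rfl | hp
        · simpa using h
        · exact (ih.mp hs) p hp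
      · intro hall; exact ih.mpr fun p hp => hall p (Or.inr hp)

theorem get?_mk_eq_none (bd : List (String × List (List String))) (c : String)
    (h : c ∉ bd.map Prod.fst) : (PySem.Dict.mk bd).get? c = none := by
  induction bd with
  | nil => simp [PySem.Dict.get?]
  | cons kv t ih =>
    simp only [List.map_cons, List.mem_cons, not_or] at h
    rw [show (PySem.Dict.mk (kv :: t)) = (PySem.Dict.mk ((kv.1, kv.2) :: t)) by simp,
      PySem.Dict.get?_mk_cons]
    simp [beq_iff_eq, Ne.symm h.1, ih h.2]

-- first-match lookup in the index B builds
theorem get?_buildIndex_aux (needed : PySem.Set String) (c : String) :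
    ∀ (bd : List (String × List (List String))) (d : PySem.Dict String (List Int × List Int)),
    (bd.map Prod.fst).Nodup →
    (bd.foldl (fun d kv => if kv.1 ∈ needed then d.insert kv.1 (entryOf kv.2) else d) d).get? c =
      (match (PySem.Dict.mk bd).get? c with
       | some ivs => if c ∈ needed then some (entryOf ivs) else d.get? c
       | none => d.get? c) := by
  intro bd
  induction bd with
  | nil => intro d _; simp [PySem.Dict.get?]
  | cons kv t ih =>
    intro d hnd
    simp only [List.map_cons, List.nodup_cons] at hnd
    rw [List.foldl_cons,
      show (PySem.Dict.mk (kv :: t)) = (PySem.Dict.mk ((kv.1, kv.2) :: t)) by simp,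
      PySem.Dict.get?_mk_cons]
    by_cases hkc : kv.1 = c
    · subst hkc
      have ht : (PySem.Dict.mk t).get? kv.1 = none := get?_mk_eq_none t kv.1 hnd.1
      rw [ih _ hnd.2, ht]
      simp only [BEq.rfl, if_true]
      by_cases hn : kv.1 ∈ needed
      · rw [if_pos hn, if_pos hn, PySem.Dict.get?_insert_self]
      · rw [if_neg hn, if_neg hn]
    · have hbeq : (kv.1 == c) = false := by simp [hkc]
      rw [ih _ hnd.2, hbeq]
      simp only [Bool.false_eq_true, if_false]
      by_cases hn : kv.1 ∈ needed
      · rw [if_pos hn]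
        cases h2 : (PySem.Dict.mk t).get? c with
        | none => exact PySem.Dict.get?_insert_of_ne _ _ (fun h => hkc h.symm)
        | some ivs =>
          simp only
          by_cases hcn : c ∈ needed
          · rw [if_pos hcn, if_pos hcn]
          · rw [if_neg hcn, if_neg hcn, PySem.Dict.get?_insert_of_ne _ _ (fun h => hkc h.symm)]
      · rw [if_neg hn]

theorem sorted_getD_mono (S : List Int) (hs : S.Pairwise (· ≤ ·)) (i j : Nat)
    (hij : i ≤ j) (hj : j < S.length) : S.getD i 0 ≤ S.getD j 0 := by
  rcases Nat.lt_or_ge i j with h | h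
  · rw [List.getD_eq_getElem _ _ (by omega), List.getD_eq_getElem _ _ hj]
    exact List.pairwise_iff_getElem.mp hs i j (by omega) hj h
  · obtain rfl : i = j := by omega
    exact le_refl _

-- binary-search loop invariant: everything left of the result is < xe, nothing from it on is
theorem bsr_spec (S : List Int) (xe : Int) (hs : S.Pairwise (· ≤ ·)) :
    ∀ (fuel lo hi : Nat), hi - lo ≤ fuel → lo ≤ hi → hi ≤ S.length →
    (∀ i, i < lo → S.getD i 0 < xe) → (∀ i, hi ≤ i → i < S.length → ¬ S.getD i 0 < xe) →
    (∀ i, i < bsr S xe fuel lo hi → S.getD i 0 < xe) ∧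
    (∀ i, bsr S xe fuel lo hi ≤ i → i < S.length → ¬ S.getD i 0 < xe) ∧
    bsr S xe fuel lo hi ≤ hi := by
  intro fuel
  induction fuel with
  | zero =>
    intro lo hi hf hlh hhl hlow hhigh
    obtain rfl : lo = hi := by omega
    exact ⟨hlow, hhigh, le_refl _⟩
  | succ n ih =>
    intro lo hi hf hlh hhl hlow hhigh
    show _ ∧ _ ∧ bsr S xe (n + 1) lo hi ≤ hi
    rw [bsr]
    by_cases h : lo < hi
    · rw [if_pos h]
      simp only
      set mid := (lo + hi) / 2 with hmid
      have hm1 : lo ≤ mid := by omega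
      have hm2 : mid < hi := by omega
      by_cases hc : S.getD mid 0 < xe
      · rw [if_pos hc]
        exact ih (mid + 1) hi (by omega) (by omega) hhl
          (fun i hi' => le_trans (sorted_getD_mono S hs i mid (by omega) (by omega)) (le_refl _) |>.trans_lt hc)
          hhigh
      · rw [if_neg hc]
        obtain ⟨a, b, c⟩ := ih lo mid (by omega) (by omega) (by omega) hlow
          (fun i hmi hil => fun hlt => hc (lt_of_le_of_lt (sorted_getD_mono S hs mid i hmi hil) hlt))
        exact ⟨a, b, by omega⟩
    · rw [if_neg h]
      obtain rfl : lo = hi := by omega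
      exact ⟨hlow, hhigh, le_refl _⟩

-- the running prefix maximum dominates exactly the ends seen so far
theorem prefmax_getD (xs : Int) :
    ∀ (L : List (Int × Int)) (m : Option Int) (k : Nat), k < L.length →
    (xs < (prefmaxGo L m).getD k 0 ↔
      (∃ v, m = some v ∧ xs < v) ∨ ∃ i, i ≤ k ∧ ∃ _ : i < L.length, xs < L[i].2) := by
  intro L
  induction L with
  | nil => intro m k hk; simp at hk
  | cons p t ih =>
    intro m k hk
    match k with
    | 0 =>
      simp only [prefmaxGo, List.getD_cons_zero]
      cases m with
      | none =>
        simp only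
        constructor
        · intro h; exact Or.inr ⟨0, le_refl 0, by simpa using h⟩
        · rintro (⟨v, hv, _⟩ | ⟨i, hi, hlen, h⟩)
          · exact absurd hv (by simp)
          · interval_cases i; simpa using h
      | some v =>
        simp only
        constructor
        · intro h
          by_cases hc : p.2 > v
          · rw [if_pos hc] at h; exact Or.inr ⟨0, le_refl 0, by simpa using h⟩
          · rw [if_neg hc] at h; exact Or.inl ⟨v, rfl, h⟩
        · rintro (⟨w, hw, h⟩ | ⟨i, hi, hlen, h⟩)
          · obtain rfl := Option.some.inj hw
            split_ifs with hc <;> omega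
          · interval_cases i
            simp only [List.getElem_cons_zero] at h
            split_ifs with hc <;> omega
    | Nat.succ k' =>
      simp only [prefmaxGo, List.getD_cons_succ]
      rw [ih _ k' (by simpa using hk)]
      constructor
      · rintro (⟨v, hv, h⟩ | ⟨i, hi, hlen, h⟩)
        · obtain rfl := Option.some.inj hv
          cases m with
          | none =>
            have h' : xs < p.2 := h
            exact Or.inr ⟨0, by omega, by simp, by simpa using h'⟩
          | some w =>
            have h' : xs < (if p.2 > w then p.2 else w) := h
            by_cases hc : p.2 > w
            · rw [if_pos hc] at h'; exact Or.inr ⟨0, by omega, by simp, by simpa using h'⟩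
            · rw [if_neg hc] at h'; exact Or.inl ⟨w, rfl, h'⟩
        · exact Or.inr ⟨i + 1, by omega, by simpa using hlen, by simpa using h⟩
      · rintro (⟨v, hv, h⟩ | ⟨i, hi, hlen, h⟩)
        · subst hv
          refine Or.inl ⟨_, rfl, ?_⟩
          show xs < (if p.2 > v then p.2 else v)
          split_ifs with hc <;> omega
        · match i with
          | 0 =>
            simp only [List.getElem_cons_zero] at h
            refine Or.inl ⟨_, rfl, ?_⟩
            cases m with
            | none => exact h
            | some w =>
              show xs < (if p.2 > w then p.2 else w)
              split_ifs with hc <;> omega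
          | Nat.succ i' =>
            exact Or.inr ⟨i', by omega, by simpa using hlen, by simpa using h⟩

theorem mem_set_foldl_add (f : List String → String) :
    ∀ (l : List (List String)) (s : PySem.Set String) (a : String),
    a ∈ s → a ∈ l.foldl (fun s x => s.add (f x)) s := by
  intro l
  induction l with
  | nil => intro s a h; exact h
  | cons y t ih =>
    intro s a h
    rw [List.foldl_cons]
    exact ih _ a ((PySem.Set.mem_add s (f y) a).mpr (Or.inl h))

theorem mem_needed (f : List String → String) :
    ∀ (l : List (List String)) (s : PySem.Set String) (a : List String),
    a ∈ l → f a ∈ l.foldl (fun s x => s.add (f x)) s := by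
  intro l
  induction l with
  | nil => intro s a h; cases h
  | cons y t ih =>
    intro s a h
    rw [List.foldl_cons]
    rcases List.mem_cons.mp h with rfl | h
    · exact mem_set_foldl_add f t _ _ ((PySem.Set.mem_add s (f a) (f a)).mpr (Or.inr rfl))
    · exact ih _ a h

-- per-chromosome: B's index answer coincides with A's scan
theorem keep_equiv (x : List String) (ivs : List (List String)) :
    ((entryOf ivs).1 = [] ∨ (bsr (entryOf ivs).1 (pvI x 2) (entryOf ivs).1.length 0 (entryOf ivs).1.length = 0 ∨
       (entryOf ivs).2.getD (bsr (entryOf ivs).1 (pvI x 2) (entryOf ivs).1.length 0 (entryOf ivs).1.length - 1) 0 ≤ pvI x 1)) ↔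
    scanA x ivs = true := by
  rw [scanA_eq_true_iff]
  have hall : (∀ p ∈ ivs.map (fun y => (pvI y 0, pvI y 1)), ¬(pvI x 1 < p.2 ∧ pvI x 2 > p.1)) ↔
      (∀ p ∈ pairsOf ivs, ¬(pvI x 1 < p.2 ∧ pvI x 2 > p.1)) := by
    constructor
    · intro h p hp; exact h p ((PySem.List.mem_sorted _ _ _ _).mp hp)
    · intro h p hp; exact h p ((PySem.List.mem_sorted _ _ _ _).mpr hp)
  rw [hall]
  set L := pairsOf ivs with hL
  set S := L.map Prod.fst with hS
  set xe := pvI x 2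
  set xs := pvI x 1
  have hlen : S.length = L.length := by simp [hS]
  have hSget : ∀ i (h : i < L.length), S.getD i 0 = L[i].1 := by
    intro i h
    rw [List.getD_eq_getElem _ _ (by omega)]
    simp [hS]
  by_cases hnil : L = []
  · simp [entryOf, ← hL, hnil]
  · have hs : S.Pairwise (· ≤ ·) := by
      rw [hS, hL]
      exact PySem.List.sorted_map_key_pairwise _ _
    have hSnil : S ≠ [] := by simpa [hS] using hnil
    obtain ⟨P1, P2, P3⟩ := bsr_spec S xe hs S.length 0 S.length (by omega) (by omega) (le_refl _)
      (by omega) (by omega)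
    set r := bsr S xe S.length 0 S.length with hr
    have hE1 : (entryOf ivs).1 = S := by simp [entryOf, ← hL, hS]
    have hE2 : (entryOf ivs).2 = prefmaxGo L none := by simp [entryOf, ← hL]
    rw [hE1, hE2, ← hr]
    have key : (r ≠ 0 ∧ xs < (prefmaxGo L none).getD (r - 1) 0) ↔
        ∃ p ∈ L, xs < p.2 ∧ p.1 < xe := by
      constructor
      · rintro ⟨hr0, hpm⟩
        have hrlen : r - 1 < L.length := by omega
        rcases (prefmax_getD xs L none (r - 1) hrlen).mp hpm with ⟨v, hv, _⟩ | ⟨i, hi, hilen, hie⟩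
        · exact absurd hv (by simp)
        · refine ⟨L[i], List.getElem_mem _, hie, ?_⟩
          rw [← hSget i hilen]
          exact P1 i (by omega)
      · rintro ⟨p, hp, h1, h2⟩
        obtain ⟨i, hilen, rfl⟩ := List.mem_iff_getElem.mp hp
        have hir : i < r := by
          by_contra hge
          exact P2 i (by omega) (by omega) (by rw [hSget i hilen]; exact h2)
        refine ⟨by omega, ?_⟩
        exact (prefmax_getD xs L none (r - 1) (by omega)).mpr (Or.inr ⟨i, by omega, hilen, h1⟩)
    constructor
    · rintro hkeep p hp ⟨h1, h2⟩
      have := key.mpr ⟨p, hp, h1, h2⟩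
      rcases hkeep with hc | hc | hc
      · exact hSnil hc
      · exact this.1 hc
      · omega
    · intro hall
      by_contra hno
      push Not at hno
      obtain ⟨p, hp, h1, h2⟩ := key.mp ⟨hno.2.1, by omega⟩
      exact hall p hp ⟨h1, h2⟩

-- ===== VERDICT (by name: the statement is the Claim_ definition above) =====
theorem exclude_regions_spec : Claim_equal_exclude_regions := by
  intro pos_bins bed_dict _hdom hpre
  show exclude_regions pos_bins bed_dict = exclude_regions_alt pos_bins bed_dict
  unfold exclude_regions exclude_regions_alt buildIndex
  apply PySem.List.foldl_congr_mem
  intro acc x hx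
  have hneed : pvStr x 0 ∈ pos_bins.foldl (fun s x => s.add (pvStr x 0)) (PySem.Set.ofList []) :=
    mem_needed (fun x => pvStr x 0) pos_bins _ x hx
  rw [get?_buildIndex_aux _ _ bed_dict _ hpre.1]
  cases hget : (PySem.Dict.mk bed_dict).get? (pvStr x 0) with
  | none => rfl
  | some ivs =>
    simp only [if_pos hneed]
    cases hscan : scanA x ivs with
    | false =>
      have hd : ¬ ((entryOf ivs).1 = [] ∨ (bsr (entryOf ivs).1 (pvI x 2) (entryOf ivs).1.length 0 (entryOf ivs).1.length = 0 ∨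
          (entryOf ivs).2.getD (bsr (entryOf ivs).1 (pvI x 2) (entryOf ivs).1.length 0 (entryOf ivs).1.length - 1) 0 ≤ pvI x 1)) :=
        fun h => by simpa [hscan] using (keep_equiv x ivs).mp h
      have h1 : ¬ (entryOf ivs).1 = [] := fun h => hd (Or.inl h)
      have h2 : ¬ (bsr (entryOf ivs).1 (pvI x 2) (entryOf ivs).1.length 0 (entryOf ivs).1.length = 0 ∨
          (entryOf ivs).2.getD (bsr (entryOf ivs).1 (pvI x 2) (entryOf ivs).1.length 0 (entryOf ivs).1.length - 1) 0 ≤ pvI x 1) :=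
        fun h => hd (Or.inr h)
      simp only [Bool.false_eq_true, if_false, if_neg h1, if_neg h2]
    | true =>
      have hd := (keep_equiv x ivs).mpr hscan
      simp only [if_true]
      by_cases h1 : (entryOf ivs).1 = []
      · rw [if_pos h1]
      · rcases hd with hc | hc
        · exact absurd hc h1
        · rw [if_neg h1]
          simp only [if_pos hc]
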